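-- pv_equiv track=rewrite | github.com/EvaLiyt/vcf2fasta | src/vcf2fasta.py | validate_sequences
-- ===== SOURCE A (Python) =====
-- from typing import Tuple, List, Dict, Optional
--
-- def validate_sequences(seq_list: List[Tuple[str, str]]) -> Dict[str, str]:
--     """
--     Validate sequences: join lines into full sequence
--     Allow identical chromosome names
--     - extract one sequence when sequences are the same,
--     - raise error when sequences are not the same.
--     """
--     validated: Dict[str, str] = {}
--     for seq_id, seq in seq_list:
--         if seq_id in validated:
--             if validated[seq_id] != seq:
--                 raise ValueError(f"Duplicate sequence ID '{seq_id}' with conflicting sequences")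
--         else:
--             validated[seq_id] = seq
--     return validated
-- ===== SOURCE B (Python) =====
-- from typing import Tuple, List, Dict
--
-- def validate_sequences(seq_list: List[Tuple[str, str]]) -> Dict[str, str]:
--     # Group all sequences by ID in one pass, then validate each group
--     # and keep the first sequence of every group.
--     groups: Dict[str, List[str]] = {}
--     for seq_id, seq in seq_list:
--         groups.setdefault(seq_id, []).append(seq)
--     for seq_id, seqs in groups.items():
--         if any(s != seqs[0] for s in seqs):
--             raise ValueError(f"Duplicate sequence ID '{seq_id}' with conflicting sequences")
--     return {k: v[0] for k, v in groups.items()}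
-- ===== Notes on version B (the rewrite author's own statement) =====
-- stated objective: alternative
-- what changed: Replaces A's incremental dict with check-on-insert by a group-by-ID pass followed by a whole-group validation and a comprehension taking each group's first sequence.
import Mathlib
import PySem

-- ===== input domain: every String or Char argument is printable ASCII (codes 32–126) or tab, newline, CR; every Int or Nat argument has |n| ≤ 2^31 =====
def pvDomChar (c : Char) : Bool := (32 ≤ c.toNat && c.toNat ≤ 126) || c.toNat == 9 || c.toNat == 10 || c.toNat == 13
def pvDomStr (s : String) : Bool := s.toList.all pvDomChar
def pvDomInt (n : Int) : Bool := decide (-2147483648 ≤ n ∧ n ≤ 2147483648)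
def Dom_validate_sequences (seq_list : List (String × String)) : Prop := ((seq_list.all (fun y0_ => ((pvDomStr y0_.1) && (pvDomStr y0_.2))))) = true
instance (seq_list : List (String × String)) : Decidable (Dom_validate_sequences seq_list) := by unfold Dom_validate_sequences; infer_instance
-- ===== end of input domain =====

-- B replaces A's incremental dict-with-check by a group-by-ID pass, group validation, and a
-- comprehension keeping each group's first sequence (objective: alternative decomposition).
-- Pre_ excludes exactly the inputs on which Python A raises ValueError (conflicting duplicate IDs).


-- ===== PORT A =====
-- for seq_id, seq in seq_list: if seq_id in validated: (raise on conflict — excluded by Pre_) else validated[seq_id] = seq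
def validate_sequences (seq_list : List (String × String)) : List (String × String) :=
  (seq_list.foldl
    (fun validated p =>
      if validated.contains p.1 then
        validated  -- Python raises here when validated[p.1] ≠ p.2; those inputs are outside Pre_
      else
        validated.insert p.1 p.2)
    (PySem.Dict.empty : PySem.Dict String String)).items

-- ===== PORT B =====
-- groups.setdefault(seq_id, []).append(seq); then validate each group (the check only raises,
-- and it never raises inside Pre_); then {k: v[0] for k, v in groups.items()} (v is nonempty
-- by construction, v[0] ported as headD "").
def validate_sequences_alt (seq_list : List (String × String)) : List (String × String) :=
  let groups : PySem.Dict String (List String) :=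
    seq_list.foldl (fun g p => g.modify p.1 [] (fun v => v ++ [p.2])) PySem.Dict.empty
  groups.items.map (fun kv => (kv.1, kv.2.headD ""))

-- ===== PRECONDITION & SPEC =====
-- Pre_ excludes exactly the inputs where Python A raises ValueError: two pairs with the same ID
-- but different sequences (B raises there too).
def Pre_validate_sequences (seq_list : List (String × String)) : Prop :=
  ∀ p ∈ seq_list, ∀ q ∈ seq_list, p.1 = q.1 → p.2 = q.2
instance (seq_list : List (String × String)) : Decidable (Pre_validate_sequences seq_list) := by
  unfold Pre_validate_sequences; infer_instance
def pvWitness_validate_sequences : (List (String × String)) :=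
  [("chr1", "ACGT"), ("chr2", "GG"), ("chr1", "ACGT")]
def Spec_validate_sequences (seq_list : List (String × String)) (out : List (String × String)) : Prop := out = validate_sequences_alt seq_list
instance (seq_list : List (String × String)) (out : List (String × String)) : Decidable (Spec_validate_sequences seq_list out) := by unfold Spec_validate_sequences; infer_instance

-- ===== CLAIM (what is proved, stated in full; the proofs are below) =====
def Claim_equal_validate_sequences : Prop := ∀ (seq_list : List (String × String)), Dom_validate_sequences seq_list → Pre_validate_sequences seq_list → Spec_validate_sequences seq_list (validate_sequences seq_list)

-- ===== LEMMAS AND PROOFS =====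

-- the projection B applies to each group entry
def pvHead (kv : String × List String) : String × String := (kv.1, kv.2.headD "")

-- Main invariant: A's accumulator is the entrywise head of B's group accumulator.
lemma fold_inv (l : List (String × String))
    (dA : PySem.Dict String String) (dG : PySem.Dict String (List String))
    (hitems : dA.items = dG.items.map pvHead)
    (hne : ∀ kv ∈ dG.items, kv.2 ≠ [])
    (hnd : dG.keys.Nodup) :
    (l.foldl (fun validated p =>
        if validated.contains p.1 then validated else validated.insert p.1 p.2) dA).items
      = ((l.foldl (fun g p => g.modify p.1 [] (fun v => v ++ [p.2])) dG).items).map pvHead := by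
  induction l generalizing dA dG with
  | nil => simpa using hitems
  | cons p t ih =>
    have hcont : dA.contains p.1 = dG.contains p.1 := by
      rcases dA with ⟨la⟩; rcases dG with ⟨lg⟩
      subst hitems
      simp [PySem.Dict.contains, List.any_map, Function.comp_def, pvHead]
    simp only [List.foldl_cons]
    by_cases h : dG.contains p.1 = true
    · rw [hcont, if_pos h]
      apply ih
      · -- modify an existing key: entrywise heads are unchanged
        rw [hitems]
        simp only [PySem.Dict.modify, PySem.Dict.insert, h, if_pos]
        rw [List.map_map]
        apply List.map_congr_left
        intro kv hkv
        obtain ⟨k0, v0⟩ := kv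
        have hne' : v0 ≠ [] := hne (k0, v0) hkv
        by_cases hk : k0 = p.1
        · subst hk
          have hget : dG.getD p.1 [] = v0 :=
            PySem.Dict.getD_of_mem_items dG hkv hnd []
          cases v0 with
          | nil => exact absurd rfl hne'
          | cons a s => simp [pvHead, hget]
        · simp [pvHead, hk]
      · -- values stay nonempty
        intro kv hkv
        simp only [PySem.Dict.modify, PySem.Dict.insert, h, if_pos,
          List.mem_map] at hkv
        rcases hkv with ⟨kv', hkv', hEq⟩
        by_cases hk : (kv'.1 == p.1) = true
        · rw [if_pos hk] at hEq; subst hEq; simp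
        · rw [if_neg hk] at hEq; subst hEq; exact hne kv' hkv'
      · -- keys unchanged up to nodup
        simpa [PySem.Dict.modify] using PySem.Dict.nodup_keys_insert _ _ _ hnd
    · have h' : dG.contains p.1 = false := by simpa using h
      have hA : dA.contains p.1 = false := by rw [hcont]; exact h'
      apply ih
      · have hgd : dG.getD p.1 [] = [] :=
          PySem.Dict.getD_of_not_contains dG [] h'
        simp only [PySem.Dict.modify, PySem.Dict.insert, hA, h', Bool.false_eq_true, if_false]
        simp [hitems, hgd, pvHead]
      · intro kv hkv
        simp only [PySem.Dict.modify, PySem.Dict.insert, h', Bool.false_eq_true, if_false,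
          List.mem_append, List.mem_singleton] at hkv
        rcases hkv with hkv | hkv
        · exact hne kv hkv
        · subst hkv; simp
      · simpa [PySem.Dict.modify] using PySem.Dict.nodup_keys_insert _ _ _ hnd

-- ===== VERDICT (by name: the statement is the Claim_ definition above) =====
theorem validate_sequences_spec : Claim_equal_validate_sequences := by
  intro seq_list _ _
  show validate_sequences seq_list = validate_sequences_alt seq_list
  unfold validate_sequences validate_sequences_alt
  exact fold_inv seq_list PySem.Dict.empty PySem.Dict.empty (by rfl) (by simp [PySem.Dict.empty]) (by simp [PySem.Dict.empty, PySem.Dict.keys])
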